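-- pv_equiv track=rewrite | github.com/rmaxseiner/SystemDocumentationCollection | src/collectors/docker_collector.py | _sanitize_home_assistant_config
-- ===== SOURCE A (Python) =====
-- def _sanitize_home_assistant_config(content: str) -> str:
--     """Sanitize Home Assistant configuration"""
--     lines = content.split('\n')
--     sanitized_lines = []
--
--     for line in lines:
--         if any(secret in line.lower() for secret in ['password:', 'token:', 'api_key:', 'secret:']):
--             if ':' in line:
--                 key_part = line.split(':', 1)[0]
--                 sanitized_lines.append(f"{key_part}: !secret REDACTED")
--             else:
--                 sanitized_lines.append(line)
--         else:
--             sanitized_lines.append(line)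
--
--     return '\n'.join(sanitized_lines)
-- ===== SOURCE B (Python) =====
-- def _redact(line, keys):
--     low = line.lower()
--     if any(k in low for k in keys):
--         return line[:line.find(':')] + ': !secret REDACTED'
--     return line
--
--
-- def _sanitize_home_assistant_config(content: str) -> str:
--     """Single pass over the characters: buffer the current line, flush it
--     redacted at each newline; no split/list-of-lines/join round trip."""
--     keys = ('password:', 'token:', 'api_key:', 'secret:')
--     out = []
--     buf = []
--     for ch in content:
--         if ch == '\n':
--             out.append(_redact(''.join(buf), keys))
--             out.append('\n')
--             buf = []
--         else:
--             buf.append(ch)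
--     out.append(_redact(''.join(buf), keys))
--     return ''.join(out)
-- ===== Notes on version B (the rewrite author's own statement) =====
-- stated objective: alternative
-- what changed: Replaces A's split-into-lines / per-line loop with appends / join pipeline by a single character-level pass that buffers the current line and flushes it redacted at each newline, and builds the redacted prefix with find+slice instead of split with maxsplit.
import Mathlib
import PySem

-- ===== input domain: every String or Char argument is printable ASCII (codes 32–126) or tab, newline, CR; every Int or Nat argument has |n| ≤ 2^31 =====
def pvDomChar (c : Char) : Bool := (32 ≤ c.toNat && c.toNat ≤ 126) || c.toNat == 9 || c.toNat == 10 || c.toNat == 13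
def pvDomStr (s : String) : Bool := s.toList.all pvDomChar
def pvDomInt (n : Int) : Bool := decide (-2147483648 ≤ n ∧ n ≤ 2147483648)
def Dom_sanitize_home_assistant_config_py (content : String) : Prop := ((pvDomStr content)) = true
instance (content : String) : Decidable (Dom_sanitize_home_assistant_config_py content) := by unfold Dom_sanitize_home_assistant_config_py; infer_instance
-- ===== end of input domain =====

-- B replaces the split/loop/join line pipeline of A by a single character pass with a line buffer; return values proved equal (alternative, not faster).

-- ===== PORT A =====
-- literal transliteration of A: split on '\n', per-line loop appending, '\n'.join
def sanitize_home_assistant_config_py (content : String) : String :=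
  let lines := PySem.Chars.splitOn content.toList ['\n']
  let sanitized_lines := lines.foldl (fun acc line =>
    if ["password:".toList, "token:".toList, "api_key:".toList, "secret:".toList].any
         (fun secret => PySem.Chars.isIn secret (PySem.Chars.lower line)) then
      if PySem.Chars.isIn [':'] line then
        let key_part := (PySem.Chars.splitOnMax line [':'] 1).headD []
        acc ++ [key_part ++ ": !secret REDACTED".toList]
      else acc ++ [line]
    else acc ++ [line]) []
  String.mk (PySem.Chars.join ['\n'] sanitized_lines)

-- ===== PORT B =====
-- transliteration of Source B's _redact
def altRedact (line : List Char) : List Char :=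
  let low := PySem.Chars.lower line
  if ["password:".toList, "token:".toList, "api_key:".toList, "secret:".toList].any
       (fun k => PySem.Chars.isIn k low) then
    PySem.List.slice line none (some (PySem.Chars.find line [':'])) ++ ": !secret REDACTED".toList
  else line

-- transliteration of Source B: one fold over the characters with state (out, buf)
def sanitize_home_assistant_config_py_alt (content : String) : String :=
  let st := content.toList.foldl
    (fun (st : List Char × List Char) ch =>
      if ch = '\n' then (st.1 ++ altRedact st.2 ++ ['\n'], [])
      else (st.1, st.2 ++ [ch])) ([], [])
  String.mk (st.1 ++ altRedact st.2)

-- ===== PRECONDITION & SPEC =====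
def Spec_sanitize_home_assistant_config_py (content : String) (out : String) : Prop := out = sanitize_home_assistant_config_py_alt content
instance (content : String) (out : String) : Decidable (Spec_sanitize_home_assistant_config_py content out) := by unfold Spec_sanitize_home_assistant_config_py; infer_instance

-- ===== CLAIM (what is proved, stated in full; the proofs are below) =====
def Claim_equal_sanitize_home_assistant_config_py : Prop := ∀ (content : String), Dom_sanitize_home_assistant_config_py content → Spec_sanitize_home_assistant_config_py content (sanitize_home_assistant_config_py content)

-- ===== LEMMAS AND PROOFS =====

-- split on a single '\n', structurally
def split1 : List Char → List (List Char)
  | [] => [[]]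
  | c :: rest => if c = '\n' then [] :: split1 rest else (split1 rest).modifyHead (c :: ·)

theorem split1_ne_nil (l : List Char) : split1 l ≠ [] := by
  induction l with
  | nil => simp [split1]
  | cons c rest ih =>
    by_cases h : c = '\n' <;> simp [split1, h]
    cases hr : split1 rest with
    | nil => exact absurd hr ih
    | cons p ps => simp

theorem splitOn_go_single : ∀ (fuel : Nat) (l cur : List Char) (acc : List (List Char)),
    l.length ≤ fuel →
    PySem.Chars.splitOn.go ['\n'] fuel l cur acc =
      acc.reverse ++ (split1 l).modifyHead (cur.reverse ++ ·) := by
  intro fuel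
  induction fuel with
  | zero =>
    intro l cur acc h
    have : l = [] := List.length_eq_zero_iff.mp (Nat.le_zero.mp h)
    subst this
    simp [PySem.Chars.splitOn.go, split1]
  | succ n ih =>
    intro l cur acc h
    cases l with
    | nil => simp [PySem.Chars.splitOn.go, split1]
    | cons c rest =>
      by_cases hc : c = '\n'
      · subst hc
        rw [show PySem.Chars.splitOn.go ['\n'] (n+1) ('\n' :: rest) cur acc
              = PySem.Chars.splitOn.go ['\n'] n rest [] (cur.reverse :: acc) by
            simp [PySem.Chars.splitOn.go, List.isPrefixOf]]
        rw [ih rest [] (cur.reverse :: acc) (by simpa using Nat.lt_succ_iff.mp (by simpa using h))]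
        simp [split1]
        cases split1 rest <;> simp
      · rw [show PySem.Chars.splitOn.go ['\n'] (n+1) (c :: rest) cur acc
              = PySem.Chars.splitOn.go ['\n'] n rest (c :: cur) acc by
            simp [PySem.Chars.splitOn.go, List.isPrefixOf, Ne.symm hc]]
        rw [ih rest (c :: cur) acc (by simpa using Nat.lt_succ_iff.mp (by simpa using h))]
        simp [split1, hc]
        cases hr : split1 rest with
        | nil => exact absurd hr (split1_ne_nil rest)
        | cons p ps => simp

theorem splitOn_single (l : List Char) : PySem.Chars.splitOn l ['\n'] = split1 l := by
  rw [PySem.Chars.splitOn, splitOn_go_single (l.length + 1) l [] [] (by omega)]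
  cases hr : split1 l with
  | nil => exact absurd hr (split1_ne_nil l)
  | cons p ps => simp

theorem splitOnMax_go_zero (fuel : Nat) (l cur : List Char) (acc : List (List Char)) :
    PySem.Chars.splitOnMax.go [':'] fuel 0 l cur acc = ((cur.reverse ++ l) :: acc).reverse := by
  cases fuel with
  | zero => simp [PySem.Chars.splitOnMax.go]
  | succ n => cases l <;> simp [PySem.Chars.splitOnMax.go]

theorem splitOnMax_go_one : ∀ (fuel : Nat) (l cur : List Char) (acc : List (List Char)),
    l.length ≤ fuel →
    PySem.Chars.splitOnMax.go [':'] fuel 1 l cur acc =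
      acc.reverse ++ (cur.reverse ++ l.takeWhile (· ≠ ':')) ::
        (if ':' ∈ l then [(l.dropWhile (· ≠ ':')).tail] else []) := by
  intro fuel
  induction fuel with
  | zero =>
    intro l cur acc h
    have : l = [] := List.length_eq_zero_iff.mp (Nat.le_zero.mp h)
    subst this
    simp [PySem.Chars.splitOnMax.go]
  | succ n ih =>
    intro l cur acc h
    cases l with
    | nil => simp [PySem.Chars.splitOnMax.go]
    | cons c rest =>
      by_cases hc : c = ':'
      · subst hc
        rw [show PySem.Chars.splitOnMax.go [':'] (n+1) 1 (':' :: rest) cur acc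
              = PySem.Chars.splitOnMax.go [':'] n 0 rest [] (cur.reverse :: acc) by
            simp [PySem.Chars.splitOnMax.go, List.isPrefixOf]]
        rw [splitOnMax_go_zero]
        simp [List.takeWhile, List.dropWhile]
      · rw [show PySem.Chars.splitOnMax.go [':'] (n+1) 1 (c :: rest) cur acc
              = PySem.Chars.splitOnMax.go [':'] n 1 rest (c :: cur) acc by
            simp [PySem.Chars.splitOnMax.go, List.isPrefixOf, Ne.symm hc]]
        rw [ih rest (c :: cur) acc (by simpa using Nat.lt_succ_iff.mp (by simpa using h))]
        simp [List.takeWhile, List.dropWhile, hc]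
        simp [Ne.symm hc]

theorem splitOnMax_head (l : List Char) :
    (PySem.Chars.splitOnMax l [':'] 1).headD [] = l.takeWhile (· ≠ ':') := by
  rw [PySem.Chars.splitOnMax]
  rw [if_neg (by omega)]
  rw [show ((1 : Int).toNat) = 1 from rfl]
  rw [splitOnMax_go_one (l.length + 1) l [] [] (by omega)]
  split <;> simp

theorem find_go_colon : ∀ (l : List Char) (k : Nat),
    PySem.Chars.find.go [':'] l k =
      if ':' ∈ l then ((k : Int) + ((l.takeWhile (· ≠ ':')).length : Int)) else -1 := by
  intro l
  induction l with
  | nil => intro k; simp [PySem.Chars.find.go]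
  | cons c rest ih =>
    intro k
    by_cases hc : c = ':'
    · subst hc
      simp [PySem.Chars.find.go, List.isPrefixOf, List.takeWhile]
    · rw [show PySem.Chars.find.go [':'] (c :: rest) k = PySem.Chars.find.go [':'] rest (k + 1) by
        simp [PySem.Chars.find.go, List.isPrefixOf, Ne.symm hc]]
      rw [ih (k + 1)]
      simp [List.takeWhile, hc, Ne.symm hc]
      split
      · push_cast; ring
      · rfl

theorem takeWhile_eq_take (p : Char → Bool) : ∀ (l : List Char),
    l.takeWhile p = l.take (l.takeWhile p).length := by
  intro l
  induction l with
  | nil => simp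
  | cons c rest ih =>
    by_cases hc : p c <;> simp [List.takeWhile, hc]
    exact ih

theorem slice_takeWhile (l : List Char) (h : ':' ∈ l) :
    PySem.List.slice l none (some (PySem.Chars.find l [':'])) = l.takeWhile (· ≠ ':') := by
  rw [PySem.Chars.find, find_go_colon l 0, if_pos h]
  have hle : (l.takeWhile (· ≠ ':')).length ≤ l.length := (List.takeWhile_sublist _).length_le
  simp only [PySem.List.slice, PySem.List.clampIdx, List.drop_zero, Nat.sub_zero]
  rw [if_neg (by omega)]
  have h0 : ((((0 : Nat) : Int)) + ((l.takeWhile (· ≠ ':')).length : Int)).toNat = (l.takeWhile (· ≠ ':')).length := by omega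
  rw [h0]
  rw [min_eq_left hle]
  exact (takeWhile_eq_take _ l).symm

theorem lowerChar_colon {c : Char} (h : PySem.Chars.lowerChar c = ':') : c = ':' := by
  unfold PySem.Chars.lowerChar at h
  split at h
  · exfalso
    rename_i hu
    unfold PySem.Chars.isupper at hu
    simp only [Bool.and_eq_true, decide_eq_true_eq] at hu
    have h1 : 65 ≤ c.toNat := hu.1
    have h2 : c.toNat ≤ 90 := hu.2
    have hv : (c.toNat + 32).isValidChar := Or.inl (by omega)
    have h3 := congrArg Char.toNat h
    rw [Char.toNat_ofNat, if_pos hv] at h3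
    have : (':' : Char).toNat = 58 := by decide
    omega
  · exact h

theorem colon_mem_of_cond (line : List Char)
    (h : (["password:".toList, "token:".toList, "api_key:".toList, "secret:".toList]).any
           (fun k => PySem.Chars.isIn k (PySem.Chars.lower line)) = true) : ':' ∈ line := by
  rw [List.any_eq_true] at h
  obtain ⟨k, hk, hIn⟩ := h
  rw [PySem.Chars.isIn_iff_infix] at hIn
  have hcol : ':' ∈ k := by
    fin_cases hk <;> decide
  have : ':' ∈ PySem.Chars.lower line := hIn.subset hcol
  rw [PySem.Chars.lower, List.mem_map] at this
  obtain ⟨c, hc, hlc⟩ := this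
  rwa [lowerChar_colon hlc] at hc

theorem isIn_colon (line : List Char) (h : ':' ∈ line) : PySem.Chars.isIn [':'] line = true := by
  rw [PySem.Chars.isIn_iff_infix]
  obtain ⟨s, t, rfl⟩ := List.append_of_mem h
  exact ⟨s, t, by simp⟩

theorem foldA (lines : List (List Char)) (acc : List (List Char)) :
    lines.foldl (fun acc line =>
      if ["password:".toList, "token:".toList, "api_key:".toList, "secret:".toList].any
           (fun secret => PySem.Chars.isIn secret (PySem.Chars.lower line)) then
        if PySem.Chars.isIn [':'] line then
          let key_part := (PySem.Chars.splitOnMax line [':'] 1).headD []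
          acc ++ [key_part ++ ": !secret REDACTED".toList]
        else acc ++ [line]
      else acc ++ [line]) acc = acc ++ lines.map altRedact := by
  induction lines generalizing acc with
  | nil => simp
  | cons line rest ih =>
    rw [List.foldl_cons, List.map_cons, ih]
    have hbody : (if ["password:".toList, "token:".toList, "api_key:".toList, "secret:".toList].any
           (fun secret => PySem.Chars.isIn secret (PySem.Chars.lower line)) then
        if PySem.Chars.isIn [':'] line then
          acc ++ [(PySem.Chars.splitOnMax line [':'] 1).headD [] ++ ": !secret REDACTED".toList]
        else acc ++ [line]
      else acc ++ [line]) = acc ++ [altRedact line] := by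
      unfold altRedact
      by_cases hcond : (["password:".toList, "token:".toList, "api_key:".toList, "secret:".toList]).any
           (fun k => PySem.Chars.isIn k (PySem.Chars.lower line)) = true
      · have hmem := colon_mem_of_cond line hcond
        rw [if_pos hcond, if_pos hcond, if_pos (isIn_colon line hmem)]
        rw [splitOnMax_head, slice_takeWhile line hmem]
      · rw [if_neg hcond, if_neg hcond]
    rw [hbody]
    simp

theorem foldB : ∀ (cs : List Char) (out buf : List Char),
    (let st := cs.foldl
        (fun (st : List Char × List Char) ch =>
          if ch = '\n' then (st.1 ++ altRedact st.2 ++ ['\n'], [])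
          else (st.1, st.2 ++ [ch])) (out, buf)
     st.1 ++ altRedact st.2) =
      out ++ PySem.Chars.join ['\n'] (((split1 cs).modifyHead (buf ++ ·)).map altRedact) := by
  intro cs
  induction cs with
  | nil => intro out buf; simp [split1, PySem.Chars.join_singleton]
  | cons c rest ih =>
    intro out buf
    by_cases hc : c = '\n'
    · subst hc
      rw [List.foldl_cons]
      rw [if_pos rfl]
      rw [ih (out ++ altRedact buf ++ ['\n']) []]
      have hmh : (split1 rest).modifyHead (([] : List Char) ++ ·) = split1 rest := by
        cases split1 rest <;> simp
      rw [hmh]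
      simp [split1]
      cases hr : split1 rest with
      | nil => exact absurd hr (split1_ne_nil rest)
      | cons p ps =>
        rw [List.map_cons, PySem.Chars.join_cons_cons]
        simp
    · rw [List.foldl_cons, if_neg hc]
      rw [ih out (buf ++ [c])]
      have : (split1 rest).modifyHead ((buf ++ [c]) ++ ·) =
          ((split1 (c :: rest)).modifyHead (buf ++ ·)) := by
        simp [split1, hc]
        cases split1 rest <;> simp
      rw [this]

-- ===== VERDICT (by name: the statement is the Claim_ definition above) =====
theorem sanitize_home_assistant_config_py_spec : Claim_equal_sanitize_home_assistant_config_py := by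
  intro content _
  unfold Spec_sanitize_home_assistant_config_py
  unfold sanitize_home_assistant_config_py sanitize_home_assistant_config_py_alt
  show String.mk _ = String.mk _
  rw [splitOn_single]
  rw [foldA]
  rw [foldB content.toList [] []]
  have hmh : (split1 content.toList).modifyHead (([] : List Char) ++ ·) = split1 content.toList := by
    cases split1 content.toList <;> simp
  rw [hmh]
  simp
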